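-- pv_equiv track=rewrite | github.com/AmirKameel/vibe-coding | agents/frontend.py | _extract_service_name
-- ===== SOURCE A (Python) =====
-- def _extract_service_name(description: str) -> str:
--     """Extract service name from task description"""
--
--     # Try to find service name in the description
--     words = description.split()
--     service_name = "api"
--
--     for i, word in enumerate(words):
--         if word.lower() in ["service", "api", "client"]:
--             if i > 0:
--                 service_name = words[i-1].lower()
--                 # Remove any non-alphanumeric characters
--                 service_name = ''.join(c for c in service_name if c.isalnum() or c == '-')
--
--     return service_name
-- ===== SOURCE B (Python) =====
-- def _extract_service_name(description: str) -> str: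
--     """Extract service name from task description (reverse scan, early exit)."""
--     words = description.split()
--     for i in range(len(words) - 1, -1, -1):
--         if words[i].lower() in ("service", "api", "client"):
--             if i > 0:
--                 w = words[i - 1].lower()
--                 return ''.join(c for c in w if c.isalnum() or c == '-')
--             break
--     return "api"
-- ===== Notes on version B (the rewrite author's own statement) =====
-- stated objective: alternative
-- what changed: Replaces the forward full pass that keeps overwriting service_name at every keyword with an early-terminating backward scan that returns at the last keyword occurrence (the predecessor of the last keyword with positive index), keeping the identical lowercase/alnum-or-hyphen cleaning.
import Mathlib
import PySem

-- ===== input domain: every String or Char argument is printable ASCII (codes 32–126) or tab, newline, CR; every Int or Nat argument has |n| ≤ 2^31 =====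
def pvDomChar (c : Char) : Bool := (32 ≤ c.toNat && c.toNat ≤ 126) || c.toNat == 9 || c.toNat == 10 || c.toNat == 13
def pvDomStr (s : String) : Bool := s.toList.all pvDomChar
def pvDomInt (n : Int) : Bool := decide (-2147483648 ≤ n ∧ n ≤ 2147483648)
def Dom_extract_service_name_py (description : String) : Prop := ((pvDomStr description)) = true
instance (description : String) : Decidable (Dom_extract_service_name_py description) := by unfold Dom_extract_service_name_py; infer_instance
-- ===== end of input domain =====

-- B replaces A's forward overwrite-every-keyword pass by an early-exiting backward scan; alternative decomposition, same cost.

-- ===== PORT A =====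
-- word.lower() in ["service", "api", "client"]
def pvIsKw (w : String) : Bool :=
  let lw := PySem.Str.lower w
  lw == "service" || lw == "api" || lw == "client"

-- ''.join(c for c in words[i-1].lower() if c.isalnum() or c == '-')
def pvClean (w : String) : String :=
  String.ofList ((PySem.Str.lower w).toList.filter (fun c => PySem.Chars.isalnum c || c == '-'))

def pvStep (words : List String) (acc : String) (p : Int × String) : String :=
  if pvIsKw p.2 then
    (if p.1 > 0 then pvClean (words.getD (p.1 - 1).toNat "") else acc)
  else acc

def extract_service_name_py (description : String) : String :=
  let words := PySem.Str.split₀ description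
  (PySem.List.enumerate words 0).foldl (pvStep words) "api"

-- ===== PORT B =====
-- backward scan: index i counts down from len(words)-1; first keyword found decides
def pvScanBack (words : List String) : Nat → String
  | 0 => "api"
  | i + 1 =>
    if pvIsKw (words.getD (i + 1) "") then pvClean (words.getD i "")
    else pvScanBack words i

def extract_service_name_py_alt (description : String) : String :=
  let words := PySem.Str.split₀ description
  match words.length with
  | 0 => "api"
  | n + 1 => pvScanBack words n

-- ===== PRECONDITION & SPEC =====
def Spec_extract_service_name_py (description : String) (out : String) : Prop := out = extract_service_name_py_alt description
instance (description : String) (out : String) : Decidable (Spec_extract_service_name_py description out) := by unfold Spec_extract_service_name_py; infer_instance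

-- ===== CLAIM (what is proved, stated in full; the proofs are below) =====
def Claim_equal_extract_service_name_py : Prop := ∀ (description : String), Dom_extract_service_name_py description → Spec_extract_service_name_py description (extract_service_name_py description)

-- ===== LEMMAS AND PROOFS =====

-- is there a keyword at a positive index?
def pvKP (words : List String) : Bool :=
  (PySem.List.enumerate words 0).any (fun p => decide (0 < p.1) && pvIsKw p.2)

theorem pvScanBack_append (ws : List String) (w : String) :
    ∀ j, j < ws.length → pvScanBack (ws ++ [w]) j = pvScanBack ws j := by
  intro j
  induction j with
  | zero => intro _; rfl
  | succ i ih =>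
    intro h
    simp only [pvScanBack]
    rw [List.getD_append _ _ _ _ h, List.getD_append _ _ _ _ (by omega)]
    by_cases hk : pvIsKw (ws.getD (i + 1) "") <;> simp [ih (by omega)]

theorem pvScanBack_noKw (ws : List String) :
    ∀ j, (∀ i, 1 ≤ i → i ≤ j → pvIsKw (ws.getD i "") = false) → pvScanBack ws j = "api" := by
  intro j
  induction j with
  | zero => intro _; rfl
  | succ i ih =>
    intro h
    simp only [pvScanBack, h (i + 1) (by omega) (le_refl _)]
    exact ih (fun k hk1 hk2 => h k hk1 (by omega))

theorem pvStep_append (ws : List String) (w : String) (acc : String) (p : Int × String)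
    (hp : p ∈ PySem.List.enumerate ws 0) :
    pvStep (ws ++ [w]) acc p = pvStep ws acc p := by
  obtain ⟨k, hk, hpe⟩ := (PySem.List.mem_enumerate_iff ws 0 p).1 hp
  subst hpe
  simp only [pvStep]
  by_cases hkw : pvIsKw ws[k]
  · simp only [hkw, if_true]
    by_cases h0 : ((0 : Int) + (k : Int)) > 0
    · rw [if_pos h0, if_pos h0]
      have hlt : (((0 : Int) + k - 1).toNat) < ws.length := by omega
      rw [List.getD_append _ _ _ _ hlt]
    · rw [if_neg h0, if_neg h0]
  · simp [hkw]

theorem pvFoldl_congr {α β : Type} (f g : β → α → β) (l : List α)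
    (h : ∀ p ∈ l, ∀ acc, f acc p = g acc p) : ∀ acc, l.foldl f acc = l.foldl g acc := by
  induction l with
  | nil => intro acc; rfl
  | cons x xs ih =>
    intro acc
    simp only [List.foldl_cons]
    rw [h x (List.mem_cons_self) acc]
    exact ih (fun p hp a => h p (List.mem_cons_of_mem _ hp) a) (g acc x)

theorem pvMain (ws : List String) :
    ∀ acc, (PySem.List.enumerate ws 0).foldl (pvStep ws) acc
      = if pvKP ws then pvScanBack ws (ws.length - 1) else acc := by
  induction ws using List.reverseRecOn with
  | nil => intro acc; simp [pvKP, PySem.List.enumerate]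
  | append_singleton ws w ih =>
    intro acc
    rw [PySem.List.enumerate_append, List.foldl_append]
    have hpre : (PySem.List.enumerate ws 0).foldl (pvStep (ws ++ [w])) acc
        = (PySem.List.enumerate ws 0).foldl (pvStep ws) acc :=
      pvFoldl_congr _ _ _ (fun p hp a => pvStep_append ws w a p hp) acc
    rw [hpre, ih acc]
    have henum1 : PySem.List.enumerate [w] ((0 : Int) + ws.length)
        = [((ws.length : Int), w)] := by
      simp [PySem.List.enumerate_cons, PySem.List.enumerate_nil]
    rw [henum1]
    have hKP : pvKP (ws ++ [w])
        = (pvKP ws || (decide ((0:Int) < ws.length) && pvIsKw w)) := by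
      simp [pvKP, PySem.List.enumerate_append, List.any_append]
    cases hws : ws.length with
    | zero =>
      have hnil : ws = [] := List.length_eq_zero_iff.mp hws
      subst hnil
      simp only [List.foldl_cons, List.foldl_nil, pvStep]
      by_cases hk : pvIsKw w <;>
        simp [hk, pvKP, PySem.List.enumerate]
    | succ m =>
      have hlen : (ws ++ [w]).length - 1 = m + 1 := by simp [hws]
      have hlast : (ws ++ [w]).getD (m + 1) "" = w := by
        rw [List.getD_append_right _ _ _ _ (by omega)]
        simp [hws]
      simp only [List.foldl_cons, List.foldl_nil]
      by_cases hk : pvIsKw w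
      · -- keyword at the last position m + 1 > 0
        have hKPt : pvKP (ws ++ [w]) = true := by
          rw [hKP, hk]
          simp only [Bool.and_true, Bool.or_eq_true, decide_eq_true_eq]
          right
          rw [hws]; positivity
        simp only [pvStep, hk, if_true]
        rw [if_pos (show (((m + 1 : Nat) : Int)) > 0 by positivity)]
        have hidx : ((((m + 1 : Nat) : Int)) - 1).toNat = m := by omega
        rw [hidx, hlen, if_pos hKPt]
        have hlast' : (ws ++ [w])[m + 1]?.getD "" = w := by
          simpa [List.getD] using hlast
        simp only [pvScanBack, List.getD]
        rw [hlast', hk]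
        simp
      · -- no keyword at the end: last step is a no-op
        have hkf : pvIsKw w = false := by simpa using hk
        have hKPe : pvKP (ws ++ [w]) = pvKP ws := by
          rw [hKP, hkf]; simp
        have hscan : pvScanBack (ws ++ [w]) (m + 1) = pvScanBack ws m := by
          simp only [pvScanBack, hlast, hkf, Bool.false_eq_true, if_false]
          exact pvScanBack_append ws w m (by omega)
        simp only [pvStep, hkf, Bool.false_eq_true, if_false]
        rw [hKPe, hlen, hscan]
        simp

theorem pvKP_false_noKw (ws : List String) (h : pvKP ws = false) :
    ∀ i, 1 ≤ i → i ≤ ws.length - 1 → pvIsKw (ws.getD i "") = false := by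
  intro i h1 h2
  by_contra hkw
  have hi : i < ws.length := by omega
  have hmem : ((0 : Int) + i, ws[i]) ∈ PySem.List.enumerate ws 0 :=
    (PySem.List.mem_enumerate_iff ws 0 _).2 ⟨i, hi, rfl⟩
  have hany : (PySem.List.enumerate ws 0).any (fun p => decide (0 < p.1) && pvIsKw p.2) = true := by
    refine List.any_eq_true.2 ⟨_, hmem, ?_⟩
    simp only [Bool.and_eq_true, decide_eq_true_eq]
    constructor
    · omega
    · rw [List.getD_eq_getElem ws "" hi] at hkw
      simpa using hkw
  rw [pvKP] at h
  simp [hany] at h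

-- ===== VERDICT (by name: the statement is the Claim_ definition above) =====
theorem extract_service_name_py_spec : Claim_equal_extract_service_name_py := by
  intro d _
  unfold Spec_extract_service_name_py extract_service_name_py extract_service_name_py_alt
  rw [pvMain (PySem.Str.split₀ d) "api"]
  cases hws : (PySem.Str.split₀ d).length with
  | zero =>
    have hnil : PySem.Str.split₀ d = [] := List.length_eq_zero_iff.mp hws
    simp [hnil, pvKP]
  | succ n =>
    by_cases hkp : pvKP (PySem.Str.split₀ d)
    · simp [hkp, hws]
    · have hkpf : pvKP (PySem.Str.split₀ d) = false := by simpa using hkp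
      simp only [hws, hkpf, Bool.false_eq_true, if_false]
      rw [pvScanBack_noKw _ n
        (fun i h1 h2 => pvKP_false_noKw _ hkpf i h1 (by omega))]
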